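-- pv_equiv track=rewrite | github.com/VoLuIcHiK/x5-hack | models/ner_model.py | _postprocess_type_brand
-- ===== SOURCE A (Python) =====
-- def _postprocess_type_brand(annotations, text):
--     """Исправленная постобработка TYPE/BRAND с правильными BIO-метками"""
--     tokens = text.split()
--
--     # Если два span подряд покрывают одно слово – оба меняем на TYPE
--     if (len(annotations) == 2 and
--         annotations[0][2] == 'B-TYPE' and annotations[1][2] == 'B-BRAND' and
--         annotations[0][1] == annotations[1][0]):
--         start, _, _ = annotations[0]
--         _, end, _ = annotations[1]
--         return [(start, end, 'B-TYPE')]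
--
--     # Если только первое слово размечено как B-TYPE, а слов больше — отмечаем все как TYPE
--     if (len(annotations) == 1 and
--         annotations[0][2] == 'B-TYPE' and
--         len(tokens) > 1):
--
--         spans = []
--         char_pos = 0
--
--         for i, token in enumerate(tokens):
--             token_start = char_pos
--             token_end = char_pos + len(token)
--
--             # Первый токен - B-TYPE, остальные - I-TYPE
--             if i == 0:
--                 spans.append((token_start, token_end, 'B-TYPE'))
--             else:
--                 spans.append((token_start, token_end, 'I-TYPE'))
--
--             # Переходим к следующему токену (учитываем пробел)
--             char_pos = token_end + 1
--
--         return spans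
--
--     # Если аннотация покрывает только часть первого слова, расширяем на все слова
--     if (len(annotations) == 1 and
--         annotations[0][2] == 'B-TYPE' and
--         len(tokens) > 0):
--
--         # Проверяем, покрывает ли аннотация весь первый токен
--         first_token_end = len(tokens[0])
--         if annotations[0][1] < first_token_end and len(tokens) > 1:
--             spans = []
--             char_pos = 0
--
--             for i, token in enumerate(tokens):
--                 token_start = char_pos
--                 token_end = char_pos + len(token)
--
--                 if i == 0:
--                     spans.append((token_start, token_end, 'B-TYPE'))
--                 else:
--                     spans.append((token_start, token_end, 'I-TYPE'))
--
--                 char_pos = token_end + 1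
--
--             return spans
--
--     return annotations
-- ===== SOURCE B (Python) =====
-- def _postprocess_type_brand(annotations, text):
--     # Touching B-TYPE + B-BRAND spans merge into one B-TYPE span.
--     if (len(annotations) == 2 and annotations[0][2] == 'B-TYPE'
--             and annotations[1][2] == 'B-BRAND'
--             and annotations[0][1] == annotations[1][0]):
--         return [(annotations[0][0], annotations[1][1], 'B-TYPE')]
--     tokens = text.split()
--     # Single B-TYPE annotation over several tokens: closed form per token —
--     # token i ends at len(' '.join(tokens[:i+1])) and starts len(tokens[i])
--     # earlier; no running position accumulator.
--     if len(annotations) == 1 and annotations[0][2] == 'B-TYPE' and len(tokens) > 1: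
--         return [(len(' '.join(tokens[:i + 1])) - len(t),
--                  len(' '.join(tokens[:i + 1])),
--                  'B-TYPE' if i == 0 else 'I-TYPE')
--                 for i, t in enumerate(tokens)]
--     return annotations
-- ===== Notes on version B (the rewrite author's own statement) =====
-- stated objective: alternative
-- what changed: B replaces A's fused loop that threads a running character position and index through the token scan by a stateless closed form: each token's end offset is len(' '.join(tokens[:i+1])) and its start is that minus len(tokens[i]); the unreachable third branch of A is dropped and the two-annotation merge is an early return.
import Mathlib
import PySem

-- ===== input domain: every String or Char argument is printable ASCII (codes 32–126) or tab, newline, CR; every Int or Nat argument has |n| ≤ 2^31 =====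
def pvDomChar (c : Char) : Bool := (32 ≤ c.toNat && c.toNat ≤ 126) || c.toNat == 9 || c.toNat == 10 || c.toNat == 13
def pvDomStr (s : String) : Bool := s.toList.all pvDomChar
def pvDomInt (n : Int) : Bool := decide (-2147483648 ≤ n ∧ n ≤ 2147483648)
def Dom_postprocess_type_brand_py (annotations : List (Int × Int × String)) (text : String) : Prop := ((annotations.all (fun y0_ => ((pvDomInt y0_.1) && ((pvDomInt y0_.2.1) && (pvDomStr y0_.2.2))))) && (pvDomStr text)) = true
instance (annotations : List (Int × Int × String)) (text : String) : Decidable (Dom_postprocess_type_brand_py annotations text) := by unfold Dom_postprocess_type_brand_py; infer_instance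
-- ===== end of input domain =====

-- B replaces A's fused position-accumulator loop by a stateless closed form (token i ends at
-- len(' '.join(tokens[:i+1]))) and drops A's unreachable third branch; same return value (proved below).


-- ===== PORT A =====
def pvSpansA (tokens : List String) : List (Int × Int × String) :=
  (tokens.foldl (fun (st : List (Int × Int × String) × Int × Nat) token =>
      let spans := st.1
      let char_pos := st.2.1
      let i := st.2.2
      let token_start := char_pos
      let token_end := char_pos + PySem.Str.len token
      let spans := if i = 0 then spans ++ [(token_start, token_end, "B-TYPE")]
                   else spans ++ [(token_start, token_end, "I-TYPE")]
      (spans, token_end + 1, i + 1)) ([], 0, 0)).1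

def postprocess_type_brand_py (annotations : List (Int × Int × String)) (text : String) : List (Int × Int × String) :=
  let tokens := PySem.Str.split₀ text
  match annotations with
  | [(s0, e0, l0), (s1, e1, l1)] =>
      -- branch 1: two touching spans B-TYPE + B-BRAND merge
      if l0 = "B-TYPE" ∧ l1 = "B-BRAND" ∧ e0 = s1 then
        [(s0, e1, "B-TYPE")]
      else annotations
  | [(_, e0, l0)] =>
      -- branch 2: single B-TYPE annotation, several tokens
      if l0 = "B-TYPE" ∧ tokens.length > 1 then pvSpansA tokens
      -- branch 3 of A (dead in Python, transliterated anyway)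
      else if l0 = "B-TYPE" ∧ tokens.length > 0 then
        if e0 < PySem.Str.len (tokens.headD "") ∧ tokens.length > 1 then pvSpansA tokens
        else annotations
      else annotations
  | _ => annotations

-- ===== PORT B =====
def postprocess_type_brand_py_alt (annotations : List (Int × Int × String)) (text : String) : List (Int × Int × String) :=
  -- Source B's annotations[0] / annotations[1] (in range: guarded by the length checks)
  if annotations.length = 2 ∧ (annotations.headD (0, 0, "")).2.2 = "B-TYPE" ∧
     ((annotations.drop 1).headD (0, 0, "")).2.2 = "B-BRAND" ∧
     (annotations.headD (0, 0, "")).2.1 = ((annotations.drop 1).headD (0, 0, "")).1 then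
    [((annotations.headD (0, 0, "")).1, ((annotations.drop 1).headD (0, 0, "")).2.1, "B-TYPE")]
  else
    let tokens := PySem.Str.split₀ text
    if annotations.length = 1 ∧ (annotations.headD (0, 0, "")).2.2 = "B-TYPE" ∧ tokens.length > 1 then
      -- closed form: token i ends at len(' '.join(tokens[:i+1])), starts len(tokens[i]) earlier
      (PySem.List.enumerate tokens).map (fun it =>
        (PySem.Str.len (PySem.Str.join " " (PySem.List.slice tokens none (some (it.1 + 1))))
           - PySem.Str.len it.2,
         PySem.Str.len (PySem.Str.join " " (PySem.List.slice tokens none (some (it.1 + 1)))),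
         if it.1 = 0 then "B-TYPE" else "I-TYPE"))
    else annotations

-- ===== PRECONDITION & SPEC =====
def Spec_postprocess_type_brand_py (annotations : List (Int × Int × String)) (text : String) (out : List (Int × Int × String)) : Prop := out = postprocess_type_brand_py_alt annotations text
instance (annotations : List (Int × Int × String)) (text : String) (out : List (Int × Int × String)) : Decidable (Spec_postprocess_type_brand_py annotations text out) := by unfold Spec_postprocess_type_brand_py; infer_instance

-- ===== CLAIM (what is proved, stated in full; the proofs are below) =====
def Claim_equal_postprocess_type_brand_py : Prop := ∀ (annotations : List (Int × Int × String)) (text : String), Dom_postprocess_type_brand_py annotations text → Spec_postprocess_type_brand_py annotations text (postprocess_type_brand_py annotations text)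

-- ===== LEMMAS AND PROOFS =====

-- recursive characterisation of A's offset loop
def offsRec : List String → Int → List (Int × Int)
  | [], _ => []
  | t :: ts, pos => (pos, pos + PySem.Str.len t) :: offsRec ts (pos + PySem.Str.len t + 1)

theorem foldA_eq (ts : List String) : ∀ (acc : List (Int × Int × String)) (pos : Int) (n : Nat),
    (ts.foldl (fun (st : List (Int × Int × String) × Int × Nat) token =>
      let spans := st.1
      let char_pos := st.2.1
      let i := st.2.2
      let token_start := char_pos
      let token_end := char_pos + PySem.Str.len token
      let spans := if i = 0 then spans ++ [(token_start, token_end, "B-TYPE")]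
                   else spans ++ [(token_start, token_end, "I-TYPE")]
      (spans, token_end + 1, i + 1)) (acc, pos, n + 1)).1
      = acc ++ (offsRec ts pos).map (fun p => (p.1, p.2, "I-TYPE")) := by
  induction ts with
  | nil => intro acc pos n; simp [offsRec]
  | cons t ts ih =>
      intro acc pos n
      simp only [List.foldl_cons]
      rw [ih]
      simp [offsRec]

theorem pvSpansA_eq (t : String) (ts : List String) :
    pvSpansA (t :: ts) =
      (0, PySem.Str.len t, "B-TYPE")
        :: (offsRec ts (PySem.Str.len t + 1)).map (fun p => (p.1, p.2, "I-TYPE")) := by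
  show (ts.foldl (fun (st : List (Int × Int × String) × Int × Nat) token =>
      let spans := st.1
      let char_pos := st.2.1
      let i := st.2.2
      let token_start := char_pos
      let token_end := char_pos + PySem.Str.len token
      let spans := if i = 0 then spans ++ [(token_start, token_end, "B-TYPE")]
                   else spans ++ [(token_start, token_end, "I-TYPE")]
      (spans, token_end + 1, i + 1)) ([(0, 0 + PySem.Str.len t, "B-TYPE")], (0 + PySem.Str.len t) + 1, 0 + 1)).1 = _
  rw [foldA_eq]
  simp

-- ' '.join over an appended last element, at the character level
theorem chars_join_append (sep p u : List Char) (l : List (List Char)) :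
    PySem.Chars.join sep ((p :: l) ++ [u]) = PySem.Chars.join sep (p :: l) ++ sep ++ u := by
  induction l generalizing p with
  | nil => simp [PySem.Chars.join_cons_cons, PySem.Chars.join_singleton]
  | cons q l ih =>
      simp only [List.cons_append, PySem.Chars.join_cons_cons]
      rw [show q :: (l ++ [u]) = (q :: l) ++ [u] from rfl, ih q]
      simp [List.append_assoc]

-- length of ' '.join of a nonempty list grows by 1 + len u when u is appended
theorem jlen_append (p u : String) (l : List String) :
    PySem.Str.len (PySem.Str.join " " ((p :: l) ++ [u]))
      = PySem.Str.len (PySem.Str.join " " (p :: l)) + 1 + PySem.Str.len u := by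
  simp only [PySem.Str.len_eq, PySem.Str.toList_join, List.map_append, List.map_cons, List.map_nil]
  rw [chars_join_append]
  simp [List.length_append]
  omega

theorem jlen_singleton (t : String) :
    PySem.Str.len (PySem.Str.join " " [t]) = PySem.Str.len t := by
  simp [PySem.Str.len_eq, PySem.Str.toList_join, PySem.Chars.join_singleton]

-- the tail of B's closed-form map equals A's offset recursion
theorem tailB (ts : List String) : ∀ (p0 : String) (pre : List String),
    (PySem.List.enumerate ts ((pre.length : Int) + 1)).map (fun it =>
        (PySem.Str.len (PySem.Str.join " "
            (PySem.List.slice ((p0 :: pre) ++ ts) none (some (it.1 + 1)))) - PySem.Str.len it.2,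
         PySem.Str.len (PySem.Str.join " "
            (PySem.List.slice ((p0 :: pre) ++ ts) none (some (it.1 + 1)))),
         if it.1 = 0 then "B-TYPE" else "I-TYPE"))
      = (offsRec ts (PySem.Str.len (PySem.Str.join " " (p0 :: pre)) + 1)).map
          (fun p => (p.1, p.2, "I-TYPE")) := by
  induction ts with
  | nil => intro p0 pre; simp [PySem.List.enumerate, offsRec]
  | cons u ts ih =>
      intro p0 pre
      rw [PySem.List.enumerate_cons, List.map_cons]
      simp only [offsRec, List.map_cons, List.cons.injEq]
      have hsl : PySem.List.slice ((p0 :: pre) ++ u :: ts) none (some (((pre.length : Int) + 1) + 1))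
          = (p0 :: pre) ++ [u] := by
        rw [PySem.List.slice_to _ (by positivity)]
        rw [show (p0 :: pre) ++ u :: ts = ((p0 :: pre) ++ [u]) ++ ts by simp]
        exact List.take_left' (by simp; omega)
      have hne : ¬ (((pre.length : Int) + 1) = 0) := by omega
      refine ⟨?_, ?_⟩
      · rw [hsl, jlen_append, if_neg hne]
        simp only [add_sub_cancel_right]
      · have hj := jlen_append p0 u pre
        have htl := ih p0 (pre ++ [u])
        simp only [List.length_append, List.length_cons, List.length_nil, Nat.cast_add,
          Nat.cast_one, Nat.cast_zero, List.cons_append, List.append_assoc] at htl hj ⊢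
        rw [hj] at htl
        convert htl using 3

-- B's branch-2 value equals A's loop value
theorem branchB (tk : String) (tks : List String) :
    pvSpansA (tk :: tks) =
      (PySem.List.enumerate (tk :: tks)).map (fun it =>
        (PySem.Str.len (PySem.Str.join " "
            (PySem.List.slice (tk :: tks) none (some (it.1 + 1)))) - PySem.Str.len it.2,
         PySem.Str.len (PySem.Str.join " "
            (PySem.List.slice (tk :: tks) none (some (it.1 + 1)))),
         if it.1 = 0 then "B-TYPE" else "I-TYPE")) := by
  rw [pvSpansA_eq]
  rw [show PySem.List.enumerate (tk :: tks) = PySem.List.enumerate (tk :: tks) 0 from rfl,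
      PySem.List.enumerate_cons, List.map_cons]
  have h0 : PySem.List.slice (tk :: tks) none (some ((0 : Int) + 1)) = [tk] := by
    rw [PySem.List.slice_to _ (by norm_num)]
    simp
  have htl := tailB tks tk []
  simp only [List.length_nil, Nat.cast_zero, List.singleton_append] at htl
  simp only [List.cons.injEq]
  refine ⟨?_, ?_⟩
  · rw [h0, jlen_singleton]
    simp
  · rw [jlen_singleton] at htl
    rw [← htl]

-- ===== VERDICT (by name: the statement is the Claim_ definition above) =====
theorem postprocess_type_brand_py_spec : Claim_equal_postprocess_type_brand_py := by
  intro annotations text _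
  unfold Spec_postprocess_type_brand_py postprocess_type_brand_py postprocess_type_brand_py_alt
  match annotations with
  | [] => simp
  | [(s0, e0, l0)] =>
      simp only [List.length_cons, List.length_nil, List.headD, List.drop]
      have hB1 : ¬(0 + 1 = 2 ∧ l0 = "B-TYPE" ∧ "" = "B-BRAND" ∧ e0 = 0) :=
        fun h => absurd h.1 (by omega)
      simp only [if_neg hB1]
      split_ifs with h1 h3 h4 h5 h6 h7 h8
      · obtain ⟨tk, tks, htk⟩ : ∃ tk tks, PySem.Str.split₀ text = tk :: tks := by
          cases hsp : PySem.Str.split₀ text with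
          | nil => rw [hsp] at h1; simp at h1
          | cons a b => exact ⟨a, b, rfl⟩
        rw [htk]
        exact branchB tk tks
      · exact absurd ⟨trivial, h1⟩ h3
      · exact absurd ⟨h4.1, h5.2⟩ h1
      · exact absurd ⟨h4.1, h5.2⟩ h1
      · exact absurd h7.2 h1
      · rfl
      · exact absurd h8.2 h1
      · rfl
  | [(s0, e0, l0), (s1, e1, l1)] =>
      simp only [List.length_cons, List.length_nil, List.headD, List.drop]
      split_ifs with h1 h2 h3 h4 h5
      · rfl
      · exact absurd h3.1 (by omega)
      · exact absurd ⟨trivial, h1.1, h1.2.1, h1.2.2⟩ h2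
      · exact absurd h4.2 h1
      · exact absurd h5.1 (by omega)
      · rfl
  | a :: b :: c :: rest =>
      simp only [List.length_cons, List.headD, List.drop]
      split_ifs with h1 h2
      · exact absurd h1.1 (by omega)
      · exact absurd h2.1 (by omega)
      · rfl
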